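-- pv_equiv track=rewrite | github.com/kirka00/ege | task_16/6.py | f
-- ===== SOURCE A (Python) =====
-- def f(n):
-- 	if n <= 13:
-- 		return n ** 3 + n * n + 1
-- 	else:
-- 		if n % 3 == 0:
-- 			return f(n - 1) + 2 * n * n - 3
-- 		else:
-- 			return f(n - 2) + 3 * n + 6
-- ===== SOURCE B (Python) =====
-- def f(n):
--     acc = 0
--     while n > 13:
--         if n % 3 == 0:
--             acc += 2 * n * n - 3
--             n -= 1
--         else:
--             acc += 3 * n + 6
--             n -= 2
--     return acc + n ** 3 + n * n + 1
-- ===== Notes on version B (the rewrite author's own statement) =====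
-- stated objective: alternative
-- what changed: The call-stack recursion is unwound into a forward iterative loop that keeps a running accumulator and decrements n until the base case.
-- outside the precondition, e.g. on f(14200): A returns 636051078571, B returns 636051078571; on f(100000): A raises RecursionError, B returns 222210556273471
import Mathlib
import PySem

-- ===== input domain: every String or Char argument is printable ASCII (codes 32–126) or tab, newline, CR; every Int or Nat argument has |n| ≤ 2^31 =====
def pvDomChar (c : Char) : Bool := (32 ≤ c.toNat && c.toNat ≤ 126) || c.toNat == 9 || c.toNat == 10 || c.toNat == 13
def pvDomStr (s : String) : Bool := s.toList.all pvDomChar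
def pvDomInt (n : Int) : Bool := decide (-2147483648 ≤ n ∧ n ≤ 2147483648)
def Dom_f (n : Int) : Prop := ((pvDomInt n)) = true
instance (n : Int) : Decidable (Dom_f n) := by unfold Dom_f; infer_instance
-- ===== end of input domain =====

-- B unwinds A's recursion into an iterative accumulator loop (same cost, O(1) stack);
-- return-value equivalence is proved on Pre_f (bounded n), outside the RecursionError region of the Python A.

-- ===== PORT A =====
def f (n : Int) : Int :=
  if n ≤ 13 then n ^ 3 + n * n + 1
  else
    if PySem.Int.mod n 3 = 0 then f (n - 1) + 2 * n * n - 3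
    else f (n - 2) + 3 * n + 6
termination_by (n - 13).toNat
decreasing_by all_goals omega

-- ===== PORT B =====
-- the while-loop of Source B: state (n, acc)
def fAltLoop (n acc : Int) : Int :=
  if n > 13 then
    if PySem.Int.mod n 3 = 0 then fAltLoop (n - 1) (acc + (2 * n * n - 3))
    else fAltLoop (n - 2) (acc + (3 * n + 6))
  else acc + n ^ 3 + n * n + 1
termination_by (n - 13).toNat
decreasing_by all_goals omega

def f_alt (n : Int) : Int := fAltLoop n 0

-- ===== PRECONDITION & SPEC =====
-- Pre_f excludes large n: beyond the bound Python A's recursion depth (about two thirds of n)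
-- approaches the interpreter recursion limit and A raises RecursionError, so A's return is not
-- guaranteed there; the bound leaves a margin for the caller's own stack depth.
def Pre_f (n : Int) : Prop := n ≤ 14000
instance (n : Int) : Decidable (Pre_f n) := by unfold Pre_f; infer_instance
def pvWitness_f : Int := (20)

def Spec_f (n : Int) (out : Int) : Prop := out = f_alt n
instance (n : Int) (out : Int) : Decidable (Spec_f n out) := by unfold Spec_f; infer_instance

-- ===== CLAIM (what is proved, stated in full; the proofs are below) =====
def Claim_equal_f : Prop := ∀ (n : Int), Dom_f n → Pre_f n → Spec_f n (f n)

-- ===== LEMMAS AND PROOFS =====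
theorem fAltLoop_eq (n acc : Int) : fAltLoop n acc = acc + f n := by
  fun_induction fAltLoop n acc with
  | case1 n acc h hm ih =>
      rw [f]; rw [if_neg (by omega), if_pos hm, ih]; ring
  | case2 n acc h hm ih =>
      rw [f]; rw [if_neg (by omega), if_neg hm, ih]; ring
  | case3 n acc h =>
      rw [f]; rw [if_pos (by omega)]; ring

-- ===== VERDICT (by name: the statement is the Claim_ definition above) =====
theorem f_spec : Claim_equal_f := by
  intro n _ _
  unfold Spec_f f_alt
  rw [fAltLoop_eq]; ring
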